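-- pv_equiv track=rewrite | github.com/XucroYuri/LocalVideo | backend/app/stages/audio.py | _resolve_runtime_provider_name
-- ===== SOURCE A (Python) =====
-- from typing import Any
--
-- def _resolve_runtime_provider_name(assets: list[dict[str, Any]]) -> str:
--     providers = {
--         str(asset.get("audio_provider") or "").strip()
--         for asset in assets
--         if isinstance(asset, dict)
--     }
--     providers.discard("")
--     if len(providers) == 1:
--         return next(iter(providers))
--     if len(providers) > 1:
--         return "mixed"
--     return "edge_tts"
-- ===== SOURCE B (Python) =====
-- def _resolve_runtime_provider_name(assets):
--     candidate = None
--     for asset in assets: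
--         if not isinstance(asset, dict):
--             continue
--         name = str(asset.get("audio_provider") or "").strip()
--         if name == "":
--             continue
--         if candidate is None:
--             candidate = name
--         elif name != candidate:
--             return "mixed"
--     return candidate if candidate is not None else "edge_tts"
-- ===== Notes on version B (the rewrite author's own statement) =====
-- stated objective: simpler
-- what changed: Replaced the set comprehension plus size-case analysis with a single pass that keeps one candidate name and returns 'mixed' immediately on the first conflicting name.
import Mathlib
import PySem

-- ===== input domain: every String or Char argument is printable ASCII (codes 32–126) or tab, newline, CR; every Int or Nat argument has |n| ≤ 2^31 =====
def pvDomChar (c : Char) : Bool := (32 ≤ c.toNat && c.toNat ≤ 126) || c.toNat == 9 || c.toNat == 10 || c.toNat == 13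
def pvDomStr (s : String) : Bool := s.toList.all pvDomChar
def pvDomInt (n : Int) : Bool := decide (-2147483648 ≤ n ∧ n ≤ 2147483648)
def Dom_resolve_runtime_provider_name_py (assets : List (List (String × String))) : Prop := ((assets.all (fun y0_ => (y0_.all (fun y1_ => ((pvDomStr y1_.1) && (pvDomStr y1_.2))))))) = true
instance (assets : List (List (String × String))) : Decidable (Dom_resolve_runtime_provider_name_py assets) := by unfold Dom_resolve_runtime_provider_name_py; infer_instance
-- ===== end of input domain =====

-- B replaces A's set comprehension + size-case analysis by a single pass keeping one
-- candidate name with an early 'mixed' exit (objective: simpler).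

-- the normalized provider name of one asset: str(asset.get("audio_provider") or "").strip()
-- ('or ""' maps both a missing key and "" to ""; str() on a str is the identity)
def pvProviderName (asset : List (String × String)) : String :=
  PySem.Str.strip ((PySem.Dict.mk asset).getD "audio_provider" "")

-- ===== PORT A =====
-- every element of `assets` is a dict under the type convention, so `isinstance(asset, dict)` is always true
def resolve_runtime_provider_name_py (assets : List (List (String × String))) : String :=
  let providers : PySem.Set String :=
    PySem.Set.discard (PySem.Set.ofList (assets.map pvProviderName)) ""
  if providers.length = 1 then
    -- next(iter(providers)) on a one-element set: its unique element
    providers.headD ""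
  else if providers.length > 1 then "mixed"
  else "edge_tts"

-- ===== PORT B =====
def pvGoB (candidate : Option String) : List (List (String × String)) → String
  | [] => candidate.getD "edge_tts"
  | asset :: rest =>
    let name := pvProviderName asset
    if name = "" then pvGoB candidate rest
    else
      match candidate with
      | none => pvGoB (some name) rest
      | some c => if name ≠ c then "mixed" else pvGoB candidate rest

def resolve_runtime_provider_name_py_alt (assets : List (List (String × String))) : String :=
  pvGoB none assets

-- ===== PRECONDITION & SPEC =====
def Spec_resolve_runtime_provider_name_py (assets : List (List (String × String))) (out : String) : Prop := out = resolve_runtime_provider_name_py_alt assets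
instance (assets : List (List (String × String))) (out : String) : Decidable (Spec_resolve_runtime_provider_name_py assets out) := by unfold Spec_resolve_runtime_provider_name_py; infer_instance

-- ===== CLAIM (what is proved, stated in full; the proofs are below) =====
def Claim_equal_resolve_runtime_provider_name_py : Prop := ∀ (assets : List (List (String × String))), Dom_resolve_runtime_provider_name_py assets → Spec_resolve_runtime_provider_name_py assets (resolve_runtime_provider_name_py assets)

-- ===== LEMMAS AND PROOFS =====

-- A's result as a function of the final provider set
def pvClassify (providers : PySem.Set String) : String :=
  if providers.length = 1 then providers.headD ""
  else if providers.length > 1 then "mixed"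
  else "edge_tts"

-- the accumulated set only grows along a fold of Set.add
theorem pv_le_length_foldl_add (l : List String) (s : PySem.Set String) :
    s.length ≤ (l.foldl PySem.Set.add s).length := by
  induction l generalizing s with
  | nil => simp
  | cons x rest ih =>
    refine le_trans ?_ (ih (PySem.Set.add s x))
    simp [PySem.Set.add_eq_ite]
    split <;> simp

-- B with candidate `some c` classifies the set accumulated from {c}, provided no "" occurs
theorem pv_goB_some (assets : List (List (String × String))) (c : String)
    (h : ∀ a ∈ assets, pvProviderName a ≠ "") :
    pvGoB (some c) assets
      = pvClassify ((assets.map pvProviderName).foldl PySem.Set.add [c]) := by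
  induction assets generalizing c with
  | nil => simp [pvGoB, pvClassify]
  | cons a rest ih =>
    have hne : pvProviderName a ≠ "" := h a (by simp)
    have hrest : ∀ x ∈ rest, pvProviderName x ≠ "" := fun x hx => h x (by simp [hx])
    by_cases hc : pvProviderName a = c
    · simp [pvGoB, hc, ih c hrest]
    · have hge : 2 ≤ (((a :: rest).map pvProviderName).foldl PySem.Set.add [c]).length := by
        refine le_trans ?_ (pv_le_length_foldl_add (rest.map pvProviderName) _)
        simp [hc]
      simp only [pvGoB, if_neg hne, ne_eq, hc, not_false_iff, if_true]
      unfold pvClassify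
      rw [if_neg (by omega), if_pos (by omega)]

-- B with candidate `none` classifies the set accumulated from ∅, provided no "" occurs
theorem pv_goB_none (assets : List (List (String × String)))
    (h : ∀ a ∈ assets, pvProviderName a ≠ "") :
    pvGoB none assets
      = pvClassify ((assets.map pvProviderName).foldl PySem.Set.add []) := by
  cases assets with
  | nil => simp [pvGoB, pvClassify]
  | cons a rest =>
    have hne : pvProviderName a ≠ "" := h a (by simp)
    have hrest : ∀ x ∈ rest, pvProviderName x ≠ "" := fun x hx => h x (by simp [hx])
    simp only [pvGoB, if_neg hne, List.map_cons, List.foldl_cons]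
    rw [pv_goB_some rest _ hrest]
    rfl

-- skipping "" during B's pass equals filtering "" out of the name list first
theorem pv_goB_filter (assets : List (List (String × String))) (c : Option String) :
    pvGoB c assets = pvGoB c (assets.filter (fun a => pvProviderName a ≠ "")) := by
  induction assets generalizing c with
  | nil => rfl
  | cons a rest ih =>
    by_cases h : pvProviderName a = ""
    · simp [pvGoB, h, ih]
    · cases c with
      | none => simp [pvGoB, h, ih]
      | some cc =>
        by_cases hc : pvProviderName a = cc
        · subst hc; simp [pvGoB, h, ih]
        · simp [pvGoB, h, hc]

-- Set.add commutes with discarding a different element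
theorem pv_discard_add_ne (s : PySem.Set String) (y x : String) (h : y ≠ x) :
    PySem.Set.discard (PySem.Set.add s y) x = PySem.Set.add (PySem.Set.discard s x) y := by
  by_cases hy : y ∈ s
  · rw [PySem.Set.add_of_mem hy, PySem.Set.add_of_mem (by rw [PySem.Set.mem_discard]; exact ⟨hy, h⟩)]
  · rw [PySem.Set.add_of_not_mem hy,
      PySem.Set.add_of_not_mem (by rw [PySem.Set.mem_discard]; exact fun hh => hy hh.1)]
    simp [PySem.Set.discard]
    exact h

-- adding then discarding the same element is just the discard
theorem pv_discard_add_self (s : PySem.Set String) (x : String) :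
    PySem.Set.discard (PySem.Set.add s x) x = PySem.Set.discard s x := by
  by_cases hx : x ∈ s
  · rw [PySem.Set.add_of_mem hx]
  · rw [PySem.Set.add_of_not_mem hx]
    simp [PySem.Set.discard]

-- discarding x from the accumulated set equals accumulating the x-filtered list
theorem pv_discard_foldl (l : List String) (s : PySem.Set String) (x : String) :
    PySem.Set.discard (l.foldl PySem.Set.add s) x
      = (l.filter (fun y => y ≠ x)).foldl PySem.Set.add (PySem.Set.discard s x) := by
  induction l generalizing s with
  | nil => rfl
  | cons y rest ih =>
    by_cases hy : y = x
    · subst hy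
      simp [ih, pv_discard_add_self]
    · simp [hy, ih, pv_discard_add_ne s y x hy]

theorem resolve_runtime_provider_name_py_spec : Claim_equal_resolve_runtime_provider_name_py := by
  intro assets _
  unfold Spec_resolve_runtime_provider_name_py resolve_runtime_provider_name_py
    resolve_runtime_provider_name_py_alt
  rw [pv_goB_filter]
  rw [pv_goB_none _ (by
    intro a ha
    rw [List.mem_filter] at ha
    simpa using ha.2)]
  show pvClassify _ = pvClassify _
  congr 1
  rw [PySem.Set.ofList_eq_foldl, pv_discard_foldl]
  have : PySem.Set.discard ([] : PySem.Set String) "" = [] := rfl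
  rw [this]
  rw [List.filter_map]
  rfl
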